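-- pv_equiv track=rewrite | github.com/GalAlon9/Intro_to_AI_HW_Bayes | bayes.py | create_password
-- ===== SOURCE A (Python) =====
-- def create_password(total: int):
--     #create a password that its ascii value is total
--     #use for the password ascii values between 32 and 127
--     password = ""
--     while total > 0:
--         if total >= 127:
--             password += chr(127)
--             total -= 127
--         else:
--             password += chr(total)
--             total -= total
--     return password
-- ===== SOURCE B (Python) =====
-- def create_password(total: int):
--     # closed form: q full chr(127) blocks plus one remainder char
--     if total <= 0:
--         return ""
--     q, r = divmod(total, 127)
--     return chr(127) * q + (chr(r) if r else "")
-- ===== Notes on version B (the rewrite author's own statement) =====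
-- stated objective: simpler
-- what changed: Replaces the repeated-subtraction while loop with a single divmod: q full chr(127) blocks via string multiplication plus an optional remainder character.
import Mathlib
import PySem

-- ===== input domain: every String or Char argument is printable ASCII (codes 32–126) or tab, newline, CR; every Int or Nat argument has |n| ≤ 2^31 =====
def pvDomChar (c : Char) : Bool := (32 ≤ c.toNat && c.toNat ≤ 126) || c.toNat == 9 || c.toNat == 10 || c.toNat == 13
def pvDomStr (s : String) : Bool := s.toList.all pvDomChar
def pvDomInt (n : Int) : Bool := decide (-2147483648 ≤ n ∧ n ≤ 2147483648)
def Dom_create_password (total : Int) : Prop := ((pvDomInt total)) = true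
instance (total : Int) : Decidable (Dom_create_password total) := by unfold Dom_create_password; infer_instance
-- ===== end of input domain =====

-- B replaces A's repeated-subtraction loop with a single divmod closed form (simpler).


-- ===== PORT A =====
-- the while loop of A, with `password` as accumulator
def create_password_loop (total : Int) (password : String) : String :=
  if total > 0 then
    if total ≥ 127 then
      create_password_loop (total - 127) (password ++ String.ofList [Char.ofNat 127])
    else
      create_password_loop (total - total) (password ++ String.ofList [Char.ofNat total.toNat])
  else password
termination_by total.toNat
decreasing_by all_goals omega

def create_password (total : Int) : String :=
  create_password_loop total ""

-- ===== PORT B =====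
def create_password_alt (total : Int) : String :=
  if total ≤ 0 then ""
  else
    let q := PySem.Int.floordiv total 127
    let r := PySem.Int.mod total 127
    String.ofList (List.replicate q.toNat (Char.ofNat 127)) ++
      (if r ≠ 0 then String.ofList [Char.ofNat r.toNat] else "")

-- ===== PRECONDITION & SPEC =====
def Spec_create_password (total : Int) (out : String) : Prop := out = create_password_alt total
instance (total : Int) (out : String) : Decidable (Spec_create_password total out) := by unfold Spec_create_password; infer_instance

-- ===== CLAIM (what is proved, stated in full; the proofs are below) =====
def Claim_equal_create_password : Prop := ∀ (total : Int), Dom_create_password total → Spec_create_password total (create_password total)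

-- ===== LEMMAS AND PROOFS =====

-- peeling one chr(127) block off B's closed form
lemma alt_step (total : Int) (h : total ≥ 127) :
    create_password_alt total = String.ofList [Char.ofNat 127] ++ create_password_alt (total - 127) := by
  unfold create_password_alt
  rw [PySem.Int.floordiv_eq_ediv_of_pos (by norm_num), PySem.Int.mod_eq_emod_of_pos (by norm_num),
      PySem.Int.floordiv_eq_ediv_of_pos (by norm_num), PySem.Int.mod_eq_emod_of_pos (by norm_num)]
  have hq : total / 127 = (total - 127) / 127 + 1 := by omega
  have hm : total % 127 = (total - 127) % 127 := by omega
  by_cases h0 : total - 127 ≤ 0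
  · have ht : total = 127 := by omega
    subst ht
    simp
  · simp only [if_neg (by omega : ¬ total ≤ 0), if_neg h0, hq, hm]
    have hqn : ((total - 127) / 127 + 1).toNat = ((total - 127) / 127).toNat + 1 := by
      have : 0 ≤ (total - 127) / 127 := by omega
      omega
    rw [hqn, List.replicate_succ, show Char.ofNat 127 :: List.replicate ((total - 127) / 127).toNat (Char.ofNat 127) = [Char.ofNat 127] ++ List.replicate ((total - 127) / 127).toNat (Char.ofNat 127) from rfl, String.ofList_append, String.append_assoc]

lemma loop_eq (n : Nat) : ∀ (total : Int), total.toNat = n → ∀ (acc : String),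
    create_password_loop total acc = acc ++ create_password_alt total := by
  induction n using Nat.strong_induction_on with
  | _ n ih =>
    intro total hn acc
    rw [create_password_loop]
    by_cases hpos : total > 0
    · rw [if_pos hpos]
      by_cases h127 : total ≥ 127
      · rw [if_pos h127]
        rw [ih (total - 127).toNat (by omega) _ rfl, alt_step total h127, String.append_assoc]
      · rw [if_neg h127]
        have hz : total - total = 0 := by ring
        rw [hz, create_password_loop]
        simp only [show ¬ ((0:Int) > 0) by omega, if_false]
        unfold create_password_alt
        rw [PySem.Int.floordiv_eq_ediv_of_pos (by norm_num), PySem.Int.mod_eq_emod_of_pos (by norm_num)]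
        have hq : total / 127 = 0 := by omega
        have hm : total % 127 = total := by omega
        simp [if_neg (by omega : ¬ total ≤ 0), hq, hm, show total ≠ 0 by omega]
    · rw [if_neg hpos]
      unfold create_password_alt
      rw [if_pos (by omega)]
      simp

-- ===== VERDICT (by name: the statement is the Claim_ definition above) =====
theorem create_password_spec : Claim_equal_create_password := by
  intro total _
  unfold Spec_create_password create_password
  rw [loop_eq total.toNat total rfl ""]
  simp
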